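-- pv_equiv track=rewrite | github.com/freemjstudio/minjee-s_algorithm | 알고리즘책/Grammar/enumeration.py | mostBalancedPartition
-- ===== SOURCE A (Python) =====
-- def mostBalancedPartition(parent, files_size):
--     def helper(node, adj, file_sizes):
--         queue = [node]
--         weight = 0
--         while queue:
--             index = queue.pop()
--             weight += file_sizes[index]
--             if index in adj:
--                 queue.extend(adj[index]) # extend는 iterable 타입을 추가해줄 떄 사용한다.
--         return weight
--     adj = {}
--     edges = []
--     for index, p in enumerate(parent):
--         edges.append((p, index))
--         if p in adj:
--             adj[p].append(index) # 부모를 기준으로 인접 그래프 향태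
--         else:
--             adj[p] = [index]
--
--     total_weight = sum(files_size)
--     min_diff = sum(files_size)
--     for e in edges:
--         p, c = e
--         adj[p].remove(c) # index를 삭제했을 떄 -> 연결 끊기
--         w1 = helper(c, adj, files_size) # c와 연결되어 있는 노드들의 value 합을 w1에 저장
--         min_diff = min(min_diff, abs(total_weight-w1*2))
--         adj[p].append(c)
--     return min_diff
-- ===== SOURCE B (Python) =====
-- def mostBalancedPartition(parent, files_size):
--     n = len(parent)
--     sub = list(files_size[:n])
--     deg = [0] * n
--     for p in parent:
--         if 0 <= p < n:
--             deg[p] += 1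
--     stack = [i for i in range(n) if deg[i] == 0]
--     while stack:
--         c = stack.pop()
--         p = parent[c]
--         if 0 <= p < n:
--             sub[p] += sub[c]
--             deg[p] -= 1
--             if deg[p] == 0:
--                 stack.append(p)
--     total = sum(files_size)
--     best = total
--     for w in sub:
--         d = abs(total - 2 * w)
--         if d < best:
--             best = d
--     return best
-- ===== Notes on version B (the rewrite author's own statement) =====
-- stated objective: faster
-- what changed: A re-traverses the whole subtree of c with a DFS stack for every edge (p,c); B computes all subtree weights in one bottom-up pass (Kahn-style leaf-stripping over the parent array) and then takes the min over edges in O(1) each.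
-- outside the precondition, e.g. on mostBalancedPartition([2, 0, 1, 4, 0], [8, 1, 8, 1, 4]): A returns 12, B returns 4; on mostBalancedPartition([1, 0], [5, 3]): A returns 8, B returns 2; on mostBalancedPartition([-1, 0], [5]): A raises IndexError, B raises IndexError
import Mathlib
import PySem

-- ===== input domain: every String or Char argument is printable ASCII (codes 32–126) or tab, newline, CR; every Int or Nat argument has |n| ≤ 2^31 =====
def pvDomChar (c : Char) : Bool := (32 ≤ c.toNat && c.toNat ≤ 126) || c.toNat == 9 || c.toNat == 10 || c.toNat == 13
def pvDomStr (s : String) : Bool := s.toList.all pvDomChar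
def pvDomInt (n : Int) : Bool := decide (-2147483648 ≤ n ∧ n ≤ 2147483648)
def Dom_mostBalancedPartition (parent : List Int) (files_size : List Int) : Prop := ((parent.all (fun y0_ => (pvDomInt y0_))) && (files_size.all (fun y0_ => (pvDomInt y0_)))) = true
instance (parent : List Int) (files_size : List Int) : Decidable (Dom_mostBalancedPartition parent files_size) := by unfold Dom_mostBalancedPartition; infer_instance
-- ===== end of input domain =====

-- B replaces A's per-edge DFS re-traversal by one bottom-up (Kahn-style) pass that computes every
-- subtree weight once, then takes the min over edges in O(1) each (objective: faster).

-- ===== PORT A =====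
-- helper(node, adj, file_sizes): the while-loop, fueled; `none` = IndexError (file_sizes[index]
-- out of range) or out of fuel; inside Pre_ the loop pops each node of c's subtree exactly once,
-- so it makes at most parent.length iterations and fuel parent.length + 1 is exact.
def pvHelperLoop (files : List Int) (adj : PySem.Dict Int (List Int)) :
    Nat → List Int → Int → Option Int
  | _, [], w => some w
  | 0, _ :: _, _ => none
  | fuel + 1, q@(_ :: _), w =>
    match PySem.List.pop? q with          -- index = queue.pop()
    | none => none
    | some (index, rest) =>
      match PySem.List.pyGet? files index with   -- weight += file_sizes[index]
      | none => none
      | some v =>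
        -- if index in adj: queue.extend(adj[index])
        let q' := if adj.contains index then rest ++ adj.getD index [] else rest
        pvHelperLoop files adj fuel q' (w + v)

-- the first for-loop: builds `edges` and the adjacency dict keyed by parent
def pvBuildA (parent : List Int) : List (Int × Int) × PySem.Dict Int (List Int) :=
  (PySem.List.enumerate parent).foldl
    (fun st ip =>
      let edges := st.1 ++ [(ip.2, ip.1)]                      -- edges.append((p, index))
      let adj := if st.2.contains ip.2
        then st.2.insert ip.2 (st.2.getD ip.2 [] ++ [ip.1])    -- adj[p].append(index)
        else st.2.insert ip.2 [ip.1]                           -- adj[p] = [index]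
      (edges, adj))
    ([], PySem.Dict.empty)

-- the second for-loop over edges; `none` propagates helper failure (remove cannot fail inside Pre_)
def pvOuterA (files : List Int) (total : Int) (fuel : Nat) :
    List (Int × Int) → PySem.Dict Int (List Int) → Int → Option Int
  | [], _, md => some md
  | (p, c) :: es, adj, md =>
    match PySem.List.remove? (adj.getD p []) c with            -- adj[p].remove(c)
    | none => none
    | some l =>
      let adj1 := adj.insert p l
      match pvHelperLoop files adj1 fuel [c] 0 with            -- w1 = helper(c, adj, files_size)
      | none => none
      | some w1 =>
        let adj2 := adj1.insert p (adj1.getD p [] ++ [c])      -- adj[p].append(c)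
        pvOuterA files total fuel es adj2 (min md |total - w1 * 2|)

def mostBalancedPartition (parent : List Int) (files_size : List Int) : Int :=
  let eadj := pvBuildA parent
  let total := files_size.sum                                  -- total_weight = sum(files_size)
  let md := files_size.sum                                     -- min_diff = sum(files_size)
  (pvOuterA files_size total (parent.length + 1) eadj.1 eadj.2 md).getD 0

-- ===== PORT B =====
-- the while-loop of B: pop a finished node, fold its subtree weight into its parent;
-- fuel parent.length + 1 is exact: every node enters the stack at most once.
def pvKahnLoop (parent : List Int) :
    Nat → List Int → List Int → List Nat → List Int × List Int
  | 0, sub, deg, _ => (sub, deg)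
  | _ + 1, sub, deg, [] => (sub, deg)
  | fuel + 1, sub, deg, h :: t =>
    let c := (h :: t).getLast (List.cons_ne_nil h t)           -- c = stack.pop()
    let rest := (h :: t).dropLast
    let p := parent.getD c 0                                   -- p = parent[c]  (c < n always)
    if 0 ≤ p ∧ p < (parent.length : Int) then
      let sub' := sub.set p.toNat (sub.getD p.toNat 0 + sub.getD c 0)  -- sub[p] += sub[c]
      let deg' := deg.set p.toNat (deg.getD p.toNat 0 - 1)             -- deg[p] -= 1
      let stack' := if deg'.getD p.toNat 0 == 0 then rest ++ [p.toNat] else rest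
      pvKahnLoop parent fuel sub' deg' stack'
    else
      pvKahnLoop parent fuel sub deg rest

def mostBalancedPartition_alt (parent : List Int) (files_size : List Int) : Int :=
  let n := parent.length
  let sub0 := files_size.take n                                -- sub = list(files_size[:n])  (0 ≤ n)
  let deg0 := parent.foldl
    (fun deg p => if 0 ≤ p ∧ p < (n : Int) then deg.set p.toNat (deg.getD p.toNat 0 + 1) else deg)
    (List.replicate n (0 : Int))
  let stack0 := (List.range n).filter (fun i => deg0.getD i 0 == 0)
  let sd := pvKahnLoop parent (n + 1) sub0 deg0 stack0
  let total := files_size.sum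
  sd.1.foldl (fun best w => let d := |total - 2 * w|; if d < best then d else best) total

-- ===== PRECONDITION & SPEC =====
-- one step up the tree: i ↦ parent[i] for a node index, anything else is a fixpoint
def pvStep (parent : List Int) (x : Int) : Int :=
  if 0 ≤ x ∧ x < (parent.length : Int) then parent.getD x.toNat 0 else x

-- Pre_ excludes (1) files_size shorter than parent, where A raises IndexError, and (2) parent
-- arrays containing a cycle (the chain condition below = every node's parent chain leaves the
-- index range, i.e. parent describes a forest): a cyclic parent array describes no tree, and
-- there A's per-edge DFS (which only breaks the cycle at the removed edge) counts the whole
-- cycle component as the subtree of every cycle node while B's bottom-up pass never finishes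
-- the cycle nodes — both values are implementation accidents no caller would rely on.
def Pre_mostBalancedPartition (parent : List Int) (files_size : List Int) : Prop :=
  parent.length ≤ files_size.length ∧
  ∀ i < parent.length,
    ¬ (0 ≤ (pvStep parent)^[parent.length] (i : Int) ∧
       (pvStep parent)^[parent.length] (i : Int) < (parent.length : Int))

instance (parent : List Int) (files_size : List Int) :
    Decidable (Pre_mostBalancedPartition parent files_size) := by
  unfold Pre_mostBalancedPartition; infer_instance

def pvWitness_mostBalancedPartition : List Int × List Int := ([-1, 0, 0, 1], [3, 1, 2, 5])

def Spec_mostBalancedPartition (parent : List Int) (files_size : List Int) (out : Int) : Prop :=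
  out = mostBalancedPartition_alt parent files_size
instance (parent : List Int) (files_size : List Int) (out : Int) :
    Decidable (Spec_mostBalancedPartition parent files_size out) := by
  unfold Spec_mostBalancedPartition; infer_instance

-- ===== CLAIM (what is proved, stated in full; the proofs are below) =====
def Claim_equal_mostBalancedPartition : Prop :=
  ∀ (parent : List Int) (files_size : List Int), Dom_mostBalancedPartition parent files_size →
    Pre_mostBalancedPartition parent files_size →
    Spec_mostBalancedPartition parent files_size (mostBalancedPartition parent files_size)

-- ===== LEMMAS AND PROOFS =====

-- ---- the ancestor chain ----
def pvChain (parent : List Int) (k : Nat) (x : Int) : Int := (pvStep parent)^[k] x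

def pvValid (parent : List Int) (x : Int) : Prop := 0 ≤ x ∧ x < (parent.length : Int)

-- y is in the subtree of x (x is y or an ancestor of y)
def pvDescB (parent : List Int) (x y : Int) : Bool :=
  (List.range (parent.length + 1)).any (fun k => pvChain parent k y == x)

-- the subtree of x, as the set of node indices below (and incl.) x
def pvDS (parent : List Int) (x : Int) : Finset Nat :=
  (Finset.range parent.length).filter (fun i => pvDescB parent x (i : Int) = true)

def pvSz (parent : List Int) (x : Int) : Nat := (pvDS parent x).card

def pvS (parent files : List Int) (x : Int) : Int := ∑ i ∈ pvDS parent x, files.getD i 0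

-- children of x, as a list (ascending) and as a set
def pvChildrenL (parent : List Int) (x : Int) : List Nat :=
  (List.range parent.length).filter (fun j => parent.getD j 0 == x)

def pvChildren (parent : List Int) (x : Int) : List Int :=
  (pvChildrenL parent x).map Int.ofNat

def pvChildF (parent : List Int) (x : Int) : Finset Nat := (pvChildrenL parent x).toFinset

-- escape depth (number of steps to leave the index range), fueled
def pvEscAux (parent : List Int) : Nat → Int → Nat
  | 0, _ => 0
  | f + 1, x =>
    if 0 ≤ x ∧ x < (parent.length : Int) then pvEscAux parent f (pvStep parent x) + 1 else 0

lemma pvStep_invalid (parent : List Int) (x : Int) (h : ¬ pvValid parent x) :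
    pvStep parent x = x := by 
  simp only [pvStep, pvValid] at *
  rw [if_neg h]

lemma pvStep_coe (parent : List Int) (j : Nat) (h : j < parent.length) :
    pvStep parent (j : Int) = parent.getD j 0 := by 
  simp only [pvStep]
  rw [if_pos (by constructor <;> omega)]
  simp

lemma pvChain_invalid (parent : List Int) (k : Nat) (x : Int) (h : ¬ pvValid parent x) :
    pvChain parent k x = x := by 
  induction k with
  | zero => rfl
  | succ k ih =>
    simp only [pvChain] at *
    rw [Function.iterate_succ_apply, pvStep_invalid parent x h, ih]

lemma pvChain_succ (parent : List Int) (k : Nat) (x : Int) :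
    pvChain parent (k + 1) x = pvChain parent k (pvStep parent x) := by 
  simp only [pvChain, Function.iterate_succ_apply]

lemma pvChain_succ' (parent : List Int) (k : Nat) (x : Int) :
    pvChain parent (k + 1) x = pvStep parent (pvChain parent k x) := by 
  simp only [pvChain, Function.iterate_succ_apply']

lemma pvChain_add (parent : List Int) (a b : Nat) (x : Int) :
    pvChain parent (a + b) x = pvChain parent a (pvChain parent b x) := by 
  simp only [pvChain, Function.iterate_add_apply]

lemma pvChain_stable (parent : List Int) (k m : Nat) (x : Int)
    (h : ¬ pvValid parent (pvChain parent k x)) (hkm : k ≤ m) :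
    pvChain parent m x = pvChain parent k x := by 
  obtain ⟨d, rfl⟩ : ∃ d, m = d + k := ⟨m - k, by omega⟩
  rw [pvChain_add]
  exact pvChain_invalid parent d _ h

lemma pvEscape (parent files : List Int) (hpre : Pre_mostBalancedPartition parent files)
    (x : Int) (hx : pvValid parent x) : ¬ pvValid parent (pvChain parent parent.length x) := by 
  obtain ⟨h0, h1⟩ := hx
  have hx2 : ((x.toNat : Nat) : Int) = x := Int.toNat_of_nonneg h0
  have := hpre.2 x.toNat (by omega)
  simpa [pvValid, pvChain, hx2] using this

lemma pvNoCycle (parent files : List Int) (hpre : Pre_mostBalancedPartition parent files)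
    (x : Int) (hx : pvValid parent x) (k : Nat) (h : pvChain parent (k + 1) x = x) : False := by 
  have hper : ∀ q : Nat, pvChain parent ((k + 1) * q) x = x := by
    intro q
    induction q with
    | zero => rfl
    | succ q ih =>
      rw [Nat.mul_succ, pvChain_add, h, ih]
  have hL : 1 ≤ parent.length := by
    rcases hx with ⟨h0, h1⟩; omega
  have hge : parent.length ≤ (k + 1) * parent.length := Nat.le_mul_of_pos_left _ (by omega)
  have hesc := pvEscape parent files hpre x hx
  have := pvChain_stable parent parent.length ((k + 1) * parent.length) x hesc hge
  rw [hper parent.length] at this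
  exact hesc (this ▸ hx)

lemma pvChain_valid_lt (parent files : List Int) (hpre : Pre_mostBalancedPartition parent files)
    (x : Int) (hx : pvValid parent x) (k : Nat) (hk : pvValid parent (pvChain parent k x)) :
    k < parent.length := by 
  by_contra hke
  push Not at hke
  have hesc := pvEscape parent files hpre x hx
  have := pvChain_stable parent parent.length k x hesc hke
  rw [this] at hk
  exact hesc hk

-- ---- descendant relation ----
lemma pvDescB_iff (parent : List Int) (x y : Int) :
    pvDescB parent x y = true ↔ ∃ k ≤ parent.length, pvChain parent k y = x := by 
  simp only [pvDescB, List.any_eq_true, List.mem_range, beq_iff_eq]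
  constructor
  · rintro ⟨k, hk, he⟩; exact ⟨k, by omega, he⟩
  · rintro ⟨k, hk, he⟩; exact ⟨k, by omega, he⟩

lemma pvDescB_self (parent : List Int) (x : Int) : pvDescB parent x x = true := by 
  rw [pvDescB_iff]
  exact ⟨0, by omega, rfl⟩

lemma pvDescB_valid (parent : List Int) (x y : Int) (h : pvDescB parent x y = true)
    (hx : pvValid parent x) : pvValid parent y := by 
  rw [pvDescB_iff] at h
  obtain ⟨k, hk, he⟩ := h
  by_contra hy
  rw [pvChain_invalid parent k y hy] at he
  exact hy (he ▸ hx)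

-- a child of x is in the subtree of whatever x is in the subtree of
lemma pvDescB_child (parent files : List Int) (hpre : Pre_mostBalancedPartition parent files)
    (c₀ x j : Int) (hc : pvValid parent c₀) (hj : pvValid parent j)
    (hstep : pvStep parent j = x) (hx : pvDescB parent c₀ x = true) :
    pvDescB parent c₀ j = true := by 
  rw [pvDescB_iff] at hx ⊢
  obtain ⟨k, hk, he⟩ := hx
  have h2 : pvChain parent (k + 1) j = c₀ := by
    rw [pvChain_succ, hstep, he]
  have hlt : k + 1 < parent.length :=
    pvChain_valid_lt parent files hpre j hj (k + 1) (h2 ▸ hc)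
  exact ⟨k + 1, by omega, h2⟩

-- c's subtree never contains c's parent
lemma pvDescB_parent_false (parent files : List Int)
    (hpre : Pre_mostBalancedPartition parent files) (c : Int) (hc : pvValid parent c) :
    pvDescB parent c (pvStep parent c) = false := by 
  by_contra h
  rw [Bool.not_eq_false, pvDescB_iff] at h
  obtain ⟨k, hk, he⟩ := h
  apply pvNoCycle parent files hpre c hc k
  rw [pvChain_succ, he]

-- ---- children ----
lemma mem_pvChildrenL (parent : List Int) (x : Int) (j : Nat) :
    j ∈ pvChildrenL parent x ↔ j < parent.length ∧ parent.getD j 0 = x := by 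
  simp [pvChildrenL, List.mem_filter]

lemma mem_pvChildF (parent : List Int) (x : Int) (j : Nat) :
    j ∈ pvChildF parent x ↔ j < parent.length ∧ parent.getD j 0 = x := by 
  rw [pvChildF, List.mem_toFinset, mem_pvChildrenL]

lemma pvChildrenL_nodup (parent : List Int) (x : Int) : (pvChildrenL parent x).Nodup := by 
  exact (List.nodup_range).filter _

lemma pvChildren_sum {M : Type} [AddCommMonoid M] (parent : List Int) (x : Int) (F : Int → M) :
    ((pvChildren parent x).map F).sum = ∑ j ∈ pvChildF parent x, F (j : Int) := by 
  rw [pvChildren, List.map_map, pvChildF, List.sum_toFinset _ (pvChildrenL_nodup parent x)]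
  rfl

-- ---- subtree partition ----
lemma pvValid_coe (parent : List Int) (j : Nat) (h : j < parent.length) :
    pvValid parent (j : Int) := by
  constructor <;> omega

lemma pvValid_toNat (parent : List Int) (x : Int) (h : pvValid parent x) :
    x.toNat < parent.length ∧ ((x.toNat : Int) = x) := by
  obtain ⟨h0, h1⟩ := h
  refine ⟨by omega, Int.toNat_of_nonneg h0⟩

-- up-extension: a descendant of a child of x is a descendant of x
lemma pvDescB_up (parent files : List Int) (hpre : Pre_mostBalancedPartition parent files)
    (x j : Int) (i : Nat) (hi : i < parent.length) (hx : pvValid parent x)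
    (hstep : pvStep parent j = x) (hd : pvDescB parent j (i : Int) = true) :
    pvDescB parent x (i : Int) = true := by
  rw [pvDescB_iff] at hd ⊢
  obtain ⟨k, hk, he⟩ := hd
  have h2 : pvChain parent (k + 1) (i : Int) = x := by
    rw [pvChain_succ', he, hstep]
  have := pvChain_valid_lt parent files hpre (i : Int) (pvValid_coe parent i hi) (k + 1) (h2 ▸ hx)
  exact ⟨k + 1, by omega, h2⟩

lemma pvDS_eq (parent files : List Int) (hpre : Pre_mostBalancedPartition parent files)
    (x : Int) (hx : pvValid parent x) :
    pvDS parent x =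
      insert x.toNat ((pvChildF parent x).biUnion (fun j => pvDS parent (j : Int))) := by 
  ext i
  simp only [pvDS, Finset.mem_filter, Finset.mem_range, Finset.mem_insert, Finset.mem_biUnion]
  constructor
  · rintro ⟨hiL, hdesc⟩
    rw [pvDescB_iff] at hdesc
    obtain ⟨k, hk, he⟩ := hdesc
    cases k with
    | zero =>
      left
      have : x = (i : Int) := he.symm
      rw [this]; simp
    | succ k =>
      right
      set j := pvChain parent k (i : Int) with hj
      have hjval : pvValid parent j := by
        by_contra hnv
        rw [pvChain_succ', ← hj, pvStep_invalid parent j hnv] at he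
        exact hnv (he ▸ hx)
      obtain ⟨hjlt, hjcast⟩ := pvValid_toNat parent j hjval
      refine ⟨j.toNat, ?_, hiL, ?_⟩
      · rw [mem_pvChildF]
        refine ⟨hjlt, ?_⟩
        have := pvStep_coe parent j.toNat hjlt
        rw [hjcast] at this
        rw [← this, hj, ← pvChain_succ']
        exact he
      · rw [hjcast, pvDescB_iff]
        exact ⟨k, by omega, hj.symm⟩
  · rintro (rfl | ⟨j, hjmem, hiL, hdesc⟩)
    · obtain ⟨hlt, hcast⟩ := pvValid_toNat parent x hx
      refine ⟨hlt, ?_⟩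
      rw [hcast]
      exact pvDescB_self parent x
    · rw [mem_pvChildF] at hjmem
      obtain ⟨hjL, hjp⟩ := hjmem
      have hstep : pvStep parent (j : Int) = x := by rw [pvStep_coe parent j hjL, hjp]
      exact ⟨hiL, pvDescB_up parent files hpre x (j : Int) i hiL hx hstep hdesc⟩

lemma pvDS_not_mem_biUnion (parent files : List Int)
    (hpre : Pre_mostBalancedPartition parent files) (x : Int) (hx : pvValid parent x) :
    x.toNat ∉ (pvChildF parent x).biUnion (fun j => pvDS parent (j : Int)) := by 
  intro hmem
  rw [Finset.mem_biUnion] at hmem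
  obtain ⟨j, hjmem, hds⟩ := hmem
  rw [mem_pvChildF] at hjmem
  obtain ⟨hjL, hjp⟩ := hjmem
  simp only [pvDS, Finset.mem_filter] at hds
  obtain ⟨hlt, hcast⟩ := pvValid_toNat parent x hx
  rw [hcast, pvDescB_iff] at hds
  obtain ⟨-, k, hk, he⟩ := hds
  apply pvNoCycle parent files hpre x hx k
  rw [pvChain_succ', he, pvStep_coe parent j hjL, hjp]

lemma pvDS_disjoint (parent files : List Int) (hpre : Pre_mostBalancedPartition parent files)
    (x : Int) (hx : pvValid parent x) :
    ∀ j₁ ∈ pvChildF parent x, ∀ j₂ ∈ pvChildF parent x, j₁ ≠ j₂ →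
      Disjoint (pvDS parent (j₁ : Int)) (pvDS parent (j₂ : Int)) := by 
  have key : ∀ j₁ ∈ pvChildF parent x, ∀ j₂ ∈ pvChildF parent x, ∀ i : Nat, ∀ k₁ k₂ : Nat,
      k₁ < k₂ → pvChain parent k₁ (i : Int) = (j₁ : Int) → pvChain parent k₂ (i : Int) = (j₂ : Int) →
      False := by
    intro j₁ hj₁ j₂ hj₂ i k₁ k₂ hlt he₁ he₂
    rw [mem_pvChildF] at hj₁ hj₂
    obtain ⟨d, hd⟩ : ∃ d, k₂ = (d + 1) + k₁ := ⟨k₂ - k₁ - 1, by omega⟩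
    rw [hd, pvChain_add, he₁] at he₂
    have hstep1 : pvStep parent (j₁ : Int) = x := by rw [pvStep_coe parent j₁ hj₁.1, hj₁.2]
    have hd1 : pvChain parent (d + 1) (j₁ : Int) = pvChain parent d x := by
      rw [pvChain_succ, hstep1]
    rw [hd1] at he₂
    apply pvNoCycle parent files hpre x hx d
    rw [pvChain_succ', he₂, pvStep_coe parent j₂ hj₂.1, hj₂.2]
  intro j₁ hj₁ j₂ hj₂ hne
  rw [Finset.disjoint_left]
  intro i hi₁ hi₂
  simp only [pvDS, Finset.mem_filter, pvDescB_iff] at hi₁ hi₂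
  obtain ⟨hiL, k₁, hk₁, he₁⟩ := hi₁
  obtain ⟨-, k₂, hk₂, he₂⟩ := hi₂
  rcases Nat.lt_trichotomy k₁ k₂ with h | h | h
  · exact key j₁ hj₁ j₂ hj₂ i k₁ k₂ h he₁ he₂
  · apply hne
    have : (j₁ : Int) = (j₂ : Int) := by rw [← he₁, ← he₂, h]
    exact_mod_cast this
  · exact key j₂ hj₂ j₁ hj₁ i k₂ k₁ h he₂ he₁

lemma pvS_rec (parent files : List Int) (hpre : Pre_mostBalancedPartition parent files)
    (x : Int) (hx : pvValid parent x) :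
    pvS parent files x = files.getD x.toNat 0 + ∑ j ∈ pvChildF parent x, pvS parent files (j : Int) := by 
  rw [pvS, pvDS_eq parent files hpre x hx, Finset.sum_insert (pvDS_not_mem_biUnion parent files hpre x hx),
    Finset.sum_biUnion]
  · rfl
  · exact fun j₁ hj₁ j₂ hj₂ hne => pvDS_disjoint parent files hpre x hx j₁ hj₁ j₂ hj₂ hne

lemma pvSz_rec (parent files : List Int) (hpre : Pre_mostBalancedPartition parent files)
    (x : Int) (hx : pvValid parent x) :
    pvSz parent x = 1 + ∑ j ∈ pvChildF parent x, pvSz parent (j : Int) := by 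
  rw [pvSz, pvDS_eq parent files hpre x hx, Finset.card_insert_of_notMem (pvDS_not_mem_biUnion parent files hpre x hx),
    Finset.card_biUnion (fun j₁ hj₁ j₂ hj₂ hne => pvDS_disjoint parent files hpre x hx j₁ hj₁ j₂ hj₂ hne)]
  simp only [pvSz]
  omega

lemma pvSz_le (parent : List Int) (x : Int) : pvSz parent x ≤ parent.length := by 
  calc (pvDS parent x).card ≤ (Finset.range parent.length).card := Finset.card_filter_le _ _
  _ = parent.length := Finset.card_range _

lemma pvSz_pos (parent : List Int) (x : Int) (hx : pvValid parent x) : 1 ≤ pvSz parent x := by 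
  have := pvValid_toNat parent x hx
  have hmem : x.toNat ∈ pvDS parent x := by
    simp only [pvDS, Finset.mem_filter, Finset.mem_range]
    refine ⟨this.1, ?_⟩
    rw [this.2]
    exact pvDescB_self parent x
  exact Finset.card_pos.mpr ⟨x.toNat, hmem⟩

-- ---- escape depth ----
lemma pvEscAux_congr (parent : List Int) :
    ∀ (f₁ f₂ k : Nat) (x : Int), ¬ pvValid parent (pvChain parent k x) → k ≤ f₁ → k ≤ f₂ →
      pvEscAux parent f₁ x = pvEscAux parent f₂ x := by 
  intro f₁
  induction f₁ with
  | zero =>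
    intro f₂ k x hk hk1 hk2
    have hk0 : k = 0 := by omega
    subst hk0
    have hx : ¬ (0 ≤ x ∧ x < (parent.length : Int)) := hk
    cases f₂ with
    | zero => rfl
    | succ f => simp [pvEscAux, if_neg hx]
  | succ f₁ ih =>
    intro f₂ k x hk hk1 hk2
    by_cases hx : 0 ≤ x ∧ x < (parent.length : Int)
    · have hk0 : k ≠ 0 := by
        intro h; subst h; exact hk hx
      obtain ⟨k', rfl⟩ : ∃ k', k = k' + 1 := ⟨k - 1, by omega⟩
      obtain ⟨f₂', rfl⟩ : ∃ f, f₂ = f + 1 := ⟨f₂ - 1, by omega⟩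
      simp only [pvEscAux, if_pos hx]
      have hch : ¬ pvValid parent (pvChain parent k' (pvStep parent x)) := by
        rw [← pvChain_succ]; exact hk
      rw [ih f₂' k' (pvStep parent x) hch (by omega) (by omega)]
    · cases f₂ with
      | zero => simp [pvEscAux, if_neg hx]
      | succ f => simp [pvEscAux, if_neg hx]

lemma pvEscAux_child (parent files : List Int) (hpre : Pre_mostBalancedPartition parent files)
    (j t : Nat) (hj : j < parent.length) (ht : t < parent.length)
    (hstep : parent.getD j 0 = (t : Int)) :
    pvEscAux parent (parent.length + 1) (j : Int) =
      pvEscAux parent (parent.length + 1) (t : Int) + 1 := by 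
  have hjv : (0 ≤ (j : Int) ∧ (j : Int) < (parent.length : Int)) := by constructor <;> omega
  simp only [pvEscAux, if_pos hjv]
  have hstep' : pvStep parent (j : Int) = (t : Int) := by
    rw [pvStep_coe parent j hj, hstep]
  rw [hstep']
  congr 1
  exact pvEscAux_congr parent parent.length (parent.length + 1) parent.length (t : Int)
    (pvEscape parent files hpre (t : Int) (pvValid_coe parent t ht)) (by omega) (by omega)

-- ---- A side ----
lemma pvGetD_eq_getElem (l : List Int) (i : Nat) (h : i < l.length) : l.getD i 0 = l[i] := by
  rw [List.getD_eq_getElem?_getD, List.getElem?_eq_getElem h]; rfl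

lemma pvHelperLoop_step (files : List Int) (adj : PySem.Dict Int (List Int)) (F : Nat)
    (rest : List Int) (x : Int) (w : Int) :
    pvHelperLoop files adj (F + 1) (rest ++ [x]) w =
      match PySem.List.pyGet? files x with
      | none => none
      | some v =>
        pvHelperLoop files adj F (if adj.contains x then rest ++ adj.getD x [] else rest) (w + v) := by
  cases hq : rest ++ [x] with
  | nil => simp at hq
  | cons a l =>
    rw [pvHelperLoop, ← hq, PySem.List.pop?_last]

lemma pvHelperLoop_spec (parent files : List Int)
    (hpre : Pre_mostBalancedPartition parent files) (c₀ : Int) (hc : pvValid parent c₀)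
    (adj : PySem.Dict Int (List Int))
    (Hadj : ∀ x : Int, pvDescB parent c₀ x = true → (adj.getD x []).Perm (pvChildren parent x)) :
    ∀ (F : Nat) (q : List Int) (w : Int), (∀ x ∈ q, pvDescB parent c₀ x = true) →
      (q.map (pvSz parent)).sum ≤ F →
      pvHelperLoop files adj F q w = some (w + (q.map (pvS parent files)).sum) := by 
  intro F
  induction F with
  | zero =>
    intro q w hq hfuel
    cases q with
    | nil => simp [pvHelperLoop]
    | cons h t =>
      exfalso
      have hd : pvDescB parent c₀ h = true := hq h (by simp)
      have hv : pvValid parent h := pvDescB_valid parent c₀ h hd hc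
      have := pvSz_pos parent h hv
      simp only [List.map_cons, List.sum_cons] at hfuel
      omega
  | succ F ih =>
    intro q w hq hfuel
    cases q with
    | nil => simp [pvHelperLoop]
    | cons h t =>
      have hne : (h :: t) ≠ [] := by simp
      have hsplit := List.dropLast_append_getLast hne
      set x := (h :: t).getLast hne with hxdef
      set rest := (h :: t).dropLast with hrdef
      rw [← hsplit, pvHelperLoop_step]
      have hdx : pvDescB parent c₀ x = true := hq x (List.getLast_mem hne)
      have hvx : pvValid parent x := pvDescB_valid parent c₀ x hdx hc
      obtain ⟨hxlt, hxcast⟩ := pvValid_toNat parent x hvx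
      have hxfl : x.toNat < files.length := by
        have := hpre.1; omega
      have hget : PySem.List.pyGet? files x = some (files.getD x.toNat 0) := by
        have h1 := PySem.List.pyGet?_natCast files x.toNat
        rw [hxcast] at h1
        rw [h1, List.getElem?_eq_getElem hxfl, pvGetD_eq_getElem files x.toNat hxfl]
      rw [hget]
      have hif : (if adj.contains x then rest ++ adj.getD x [] else rest) = rest ++ adj.getD x [] := by
        by_cases hcont : adj.contains x = true
        · rw [if_pos hcont]
        · rw [if_neg (by simp [hcont]),
            PySem.Dict.getD_of_not_contains adj [] (by simpa using hcont)]
          simp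
      rw [hif]
      have hperm := Hadj x hdx
      have hsumS : ((adj.getD x []).map (pvS parent files)).sum
          = ∑ j ∈ pvChildF parent x, pvS parent files (j : Int) := by
        rw [(hperm.map (pvS parent files)).sum_eq, pvChildren_sum]
      have hsumSz : ((adj.getD x []).map (pvSz parent)).sum
          = ∑ j ∈ pvChildF parent x, pvSz parent (j : Int) := by
        rw [(hperm.map (pvSz parent)).sum_eq, pvChildren_sum]
      have hSrec := pvS_rec parent files hpre x hvx
      have hszrec := pvSz_rec parent files hpre x hvx
      rw [← hsplit] at hfuel
      simp only [List.map_append, List.sum_append, List.map_cons, List.sum_cons,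
        List.map_nil, List.sum_nil] at hfuel
      show pvHelperLoop files adj F (rest ++ adj.getD x []) (w + files.getD x.toNat 0) = _
      rw [ih (rest ++ adj.getD x []) (w + files.getD x.toNat 0) ?_ ?_]
      · congr 1
        simp only [List.map_append, List.sum_append, List.map_cons, List.sum_cons,
          List.map_nil, List.sum_nil]
        rw [hsumS]
        omega
      · intro y hy
        rcases List.mem_append.mp hy with hy | hy
        · exact hq y ((List.dropLast_sublist (h :: t)).subset hy)
        · have hy2 : y ∈ pvChildren parent x := hperm.mem_iff.mp hy
          obtain ⟨j, hjmem, hje⟩ := List.mem_map.mp hy2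
          obtain ⟨hjL, hjp⟩ := (mem_pvChildrenL parent x j).mp hjmem
          have hje' : (j : Int) = y := by exact_mod_cast hje
          rw [← hje']
          exact pvDescB_child parent files hpre c₀ x (j : Int) hc (pvValid_coe parent j hjL)
            (by rw [pvStep_coe parent j hjL, hjp]) hdx
      · simp only [List.map_append, List.sum_append]
        rw [hsumSz]
        omega

lemma pvBuildA_step_fst (l : List (Int × Int)) :
    ∀ (es : List (Int × Int)) (d : PySem.Dict Int (List Int)),
    (l.foldl (fun st ip =>
      ((st.1 ++ [(ip.2, ip.1)] : List (Int × Int)),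
       if st.2.contains ip.2
        then st.2.insert ip.2 (st.2.getD ip.2 [] ++ [ip.1])
        else st.2.insert ip.2 [ip.1])) (es, d)).1 = es ++ l.map (fun ip => (ip.2, ip.1)) := by
  induction l with
  | nil => intro es d; simp
  | cons hd tl ih =>
    intro es d
    simp only [List.foldl_cons, List.map_cons]
    rw [ih]
    simp

lemma pvBuildA_step_adj (l : List (Int × Int)) :
    ∀ (es : List (Int × Int)) (d : PySem.Dict Int (List Int)) (x : Int),
    ((l.foldl (fun st ip =>
      ((st.1 ++ [(ip.2, ip.1)] : List (Int × Int)),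
       if st.2.contains ip.2
        then st.2.insert ip.2 (st.2.getD ip.2 [] ++ [ip.1])
        else st.2.insert ip.2 [ip.1])) (es, d)).2).getD x []
      = d.getD x [] ++ (l.filter (fun ip => ip.2 == x)).map (fun ip => ip.1) := by
  induction l with
  | nil => intro es d x; simp
  | cons hd tl ih =>
    intro es d x
    simp only [List.foldl_cons, List.filter_cons]
    rw [ih]
    have hstep : (if d.contains hd.2
        then d.insert hd.2 (d.getD hd.2 [] ++ [hd.1])
        else d.insert hd.2 [hd.1]).getD x []
        = if hd.2 == x then d.getD x [] ++ [hd.1] else d.getD x [] := by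
      by_cases hc : d.contains hd.2 = true
      · rw [if_pos hc, PySem.Dict.getD_insert]
        by_cases hx : hd.2 = x
        · subst hx; simp
        · rw [if_neg (fun h => hx h.symm), if_neg (by simpa using hx)]
      · rw [if_neg (by simp [hc]), PySem.Dict.getD_insert]
        by_cases hx : hd.2 = x
        · subst hx
          rw [if_pos rfl, if_pos (by simp), PySem.Dict.getD_of_not_contains d [] (by simpa using hc)]
          simp
        · rw [if_neg (fun h => hx h.symm), if_neg (by simpa using hx)]
    rw [hstep]
    by_cases hx : hd.2 == x
    · rw [if_pos hx, if_pos hx]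
      simp
    · rw [if_neg (by simpa using hx), if_neg (by simpa using hx)]

lemma pvBuildA_fst (parent : List Int) :
    (pvBuildA parent).1 = (PySem.List.enumerate parent).map (fun ip => (ip.2, ip.1)) := by 
  rw [pvBuildA, pvBuildA_step_fst]
  simp

lemma pvBuildA_adj (parent : List Int) (x : Int) :
    (pvBuildA parent).2.getD x [] = pvChildren parent x := by 
  rw [pvBuildA, pvBuildA_step_adj]
  rw [PySem.Dict.getD_empty, List.nil_append]
  rw [PySem.List.enumerate_eq_map_pyRange parent 0]
  have hlen : PySem.List.len parent = (parent.length : Int) := by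
    simp [PySem.List.len_eq]
  rw [hlen, PySem.List.pyRange_zero_natCast, List.map_map, List.filter_map, List.map_map]
  rw [pvChildren, pvChildrenL]
  congr 1
  · congr 1
    funext j
    simp [Function.comp, PySem.List.pyGetD_natCast]

lemma pvOuterA_spec (parent files : List Int)
    (hpre : Pre_mostBalancedPartition parent files) (total : Int) :
    ∀ (es : List (Int × Int)) (adj : PySem.Dict Int (List Int)) (md : Int),
      (∀ pc ∈ es, ∃ j : Nat, j < parent.length ∧ pc = (parent.getD j 0, (j : Int))) →
      (∀ x : Int, (adj.getD x []).Perm (pvChildren parent x)) →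
      pvOuterA files total (parent.length + 1) es adj md =
        some (es.foldl (fun m pc => min m |total - pvS parent files pc.2 * 2|) md) := by 
  intro es
  induction es with
  | nil => intro adj md hes Hadj; simp [pvOuterA]
  | cons pc es ih =>
    intro adj md hes Hadj
    obtain ⟨p, c⟩ := pc
    obtain ⟨j, hjL, hpc⟩ := hes (p, c) (by simp)
    have hp : p = parent.getD j 0 := congrArg Prod.fst hpc
    have hc : c = (j : Int) := congrArg Prod.snd hpc
    have hcmem : c ∈ pvChildren parent p := by
      rw [pvChildren, List.mem_map]
      exact ⟨j, (mem_pvChildrenL parent p j).mpr ⟨hjL, hp.symm⟩, by rw [hc]; rfl⟩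
    have hcadj : c ∈ adj.getD p [] := (Hadj p).mem_iff.mpr hcmem
    have hcv : pvValid parent c := by rw [hc]; exact pvValid_coe parent j hjL
    have hstepc : pvStep parent c = p := by
      rw [hc, pvStep_coe parent j hjL, hp]
    rw [pvOuterA, PySem.List.remove?_eq_some_erase _ c hcadj]
    dsimp only
    have Hadj1 : ∀ x : Int, pvDescB parent c x = true →
        ((adj.insert p ((adj.getD p []).erase c)).getD x []).Perm (pvChildren parent x) := by
      intro x hdx
      have hxp : x ≠ p := by
        intro h
        subst h
        rw [← hstepc] at hdx
        rw [pvDescB_parent_false parent files hpre c hcv] at hdx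
        exact Bool.false_ne_true hdx
      rw [PySem.Dict.getD_insert, if_neg hxp]
      exact Hadj x
    have hhelp := pvHelperLoop_spec parent files hpre c hcv _ Hadj1 (parent.length + 1) [c] 0
      (by intro x hx; rw [List.mem_singleton] at hx; rw [hx]; exact pvDescB_self parent c)
      (by simp only [List.map_cons, List.map_nil, List.sum_cons, List.sum_nil]
          have := pvSz_le parent c; omega)
    rw [hhelp]
    dsimp only
    have hg1 : ((adj.insert p ((adj.getD p []).erase c)).getD p []) = (adj.getD p []).erase c := by
      rw [PySem.Dict.getD_insert, if_pos rfl]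
    have Hadj2 : ∀ x : Int,
        (((adj.insert p ((adj.getD p []).erase c)).insert p
          (((adj.insert p ((adj.getD p []).erase c)).getD p []) ++ [c])).getD x []).Perm
          (pvChildren parent x) := by
      intro x
      rw [hg1, PySem.Dict.getD_insert]
      by_cases hxp : x = p
      · rw [if_pos hxp, hxp]
        exact ((List.perm_append_singleton c _).trans
          (((Hadj p).erase c).cons c)).trans (List.perm_cons_erase hcmem).symm
      · rw [if_neg hxp, PySem.Dict.getD_insert, if_neg hxp]
        exact Hadj x
    rw [ih _ _ (fun pc hpc => hes pc (by simp [hpc])) Hadj2]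
    simp only [List.foldl_cons]
    norm_num

lemma pvA_eq (parent files : List Int) (hpre : Pre_mostBalancedPartition parent files) :
    mostBalancedPartition parent files =
      (List.range parent.length).foldl
        (fun (m : Int) (j : Nat) => min m |files.sum - pvS parent files (j : Int) * 2|) files.sum := by 
  have hedges := pvBuildA_fst parent
  have hes : ∀ pc ∈ (pvBuildA parent).1, ∃ j : Nat, j < parent.length ∧
      pc = (parent.getD j 0, (j : Int)) := by
    intro pc hpc
    rw [hedges, List.mem_map] at hpc
    obtain ⟨ip, hip, rfl⟩ := hpc
    rw [PySem.List.mem_enumerate_iff] at hip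
    obtain ⟨k, hk, rfl⟩ := hip
    exact ⟨k, hk, by simp [List.getD_eq_getElem?_getD, List.getElem?_eq_getElem hk]⟩
  have Hadj : ∀ x : Int, (((pvBuildA parent).2).getD x []).Perm (pvChildren parent x) := by
    intro x; rw [pvBuildA_adj]
  have houter := pvOuterA_spec parent files hpre files.sum (pvBuildA parent).1
    (pvBuildA parent).2 files.sum hes Hadj
  show (pvOuterA files files.sum (parent.length + 1) (pvBuildA parent).1 (pvBuildA parent).2
      files.sum).getD 0 = _
  rw [houter, Option.getD_some, hedges]
  rw [List.foldl_map]
  rw [PySem.List.enumerate_eq_map_pyRange parent 0]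
  have hlen : PySem.List.len parent = (parent.length : Int) := by simp [PySem.List.len_eq]
  rw [hlen, PySem.List.pyRange_zero_natCast, List.map_map, List.foldl_map]
  rfl

-- ---- B side ----
def pvInv (parent files sub deg : List Int) (stack : List Nat) (P : Finset Nat) : Prop :=
  sub.length = parent.length ∧ deg.length = parent.length ∧
  P ⊆ Finset.range parent.length ∧
  (∀ i ∈ P, pvChildF parent (i : Int) ⊆ P) ∧
  stack.Nodup ∧
  (∀ c ∈ stack, c < parent.length ∧ c ∉ P ∧ pvChildF parent (c : Int) ⊆ P) ∧
  (∀ i < parent.length, i ∉ P → pvChildF parent (i : Int) ⊆ P → i ∈ stack) ∧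
  (∀ i < parent.length,
    sub.getD i 0 = files.getD i 0 + ∑ j ∈ pvChildF parent (i : Int) ∩ P, pvS parent files (j : Int)) ∧
  (∀ i < parent.length, deg.getD i 0 = (((pvChildF parent (i : Int)) \ P).card : Int))

lemma pvGetD_set_self (l : List Int) (i : Nat) (v : Int) (h : i < l.length) :
    (l.set i v).getD i 0 = v := by
  rw [List.getD_eq_getElem?_getD, List.getElem?_set, if_pos rfl, if_pos h]
  rfl

lemma pvGetD_set_ne (l : List Int) (i j : Nat) (v : Int) (h : i ≠ j) :
    (l.set i v).getD j 0 = l.getD j 0 := by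
  rw [List.getD_eq_getElem?_getD, List.getElem?_set, if_neg h, ← List.getD_eq_getElem?_getD]

lemma pvCount_eq_filter_range (l : List Int) (x : Int) :
    l.count x = ((List.range l.length).filter (fun j => l.getD j 0 == x)).length := by
  induction l using List.reverseRecOn with
  | nil => simp
  | append_singleton l a ih =>
    rw [List.count_append, List.length_append, List.length_singleton, List.range_succ,
      List.filter_append]
    have h1 : (List.range l.length).filter (fun j => (l ++ [a]).getD j 0 == x)
        = (List.range l.length).filter (fun j => l.getD j 0 == x) := by
      apply List.filter_congr
      intro j hj
      rw [List.mem_range] at hj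
      have : (l ++ [a]).getD j 0 = l.getD j 0 := by
        rw [pvGetD_eq_getElem _ _ (by simp; omega), pvGetD_eq_getElem _ _ hj,
          List.getElem_append_left hj]
      rw [this]
    rw [h1, List.length_append, ← ih]
    have h2 : (l ++ [a]).getD l.length 0 = a := by
      rw [pvGetD_eq_getElem _ _ (by simp), List.getElem_concat_length rfl]
    simp only [List.filter_cons, List.filter_nil, h2]
    by_cases hax : a = x
    · rw [if_pos (by simpa using hax)]
      simp [hax]
    · rw [if_neg (by simpa using hax)]
      simp [List.count_singleton]
      omega

lemma pvCount_eq_childF_card (parent : List Int) (i : Nat) :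
    parent.count ((i : Nat) : Int) = (pvChildF parent (i : Int)).card := by
  rw [pvChildF, List.toFinset_card_of_nodup (pvChildrenL_nodup parent _), pvChildrenL,
    pvCount_eq_filter_range]

lemma pvDeg0_fold (parent : List Int) :
    ∀ (l : List Int) (d : List Int), d.length = parent.length →
      ((l.foldl (fun deg p => if 0 ≤ p ∧ p < (parent.length : Int)
          then deg.set p.toNat (deg.getD p.toNat 0 + 1) else deg) d).length = parent.length ∧
       ∀ i < parent.length,
        (l.foldl (fun deg p => if 0 ≤ p ∧ p < (parent.length : Int)
          then deg.set p.toNat (deg.getD p.toNat 0 + 1) else deg) d).getD i 0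
          = d.getD i 0 + l.count ((i : Nat) : Int)) := by
  intro l
  induction l with
  | nil => intro d hd; simp [hd]
  | cons p tl ih =>
    intro d hd
    simp only [List.foldl_cons]
    by_cases hp : 0 ≤ p ∧ p < (parent.length : Int)
    · rw [if_pos hp]
      obtain ⟨hlen, hih⟩ := ih (d.set p.toNat (d.getD p.toNat 0 + 1)) (by simp [hd])
      refine ⟨hlen, fun i hi => ?_⟩
      rw [hih i hi]
      by_cases hpi : p.toNat = i
      · subst hpi
        rw [pvGetD_set_self d p.toNat _ (by omega)]
        have hpe : ((p.toNat : Nat) : Int) = p := by omega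
        rw [List.count_cons, if_pos (by simpa using hpe)]
        push_cast
        omega
      · rw [pvGetD_set_ne d p.toNat i _ hpi]
        have hpe : ¬ (p = ((i : Nat) : Int)) := by omega
        rw [List.count_cons, if_neg (by simpa using hpe)]
        push_cast
        omega
    · rw [if_neg hp]
      obtain ⟨hlen, hih⟩ := ih d hd
      refine ⟨hlen, fun i hi => ?_⟩
      rw [hih i hi]
      have hpe : ¬ (p = ((i : Nat) : Int)) := by
        intro h; apply hp; constructor <;> omega
      rw [List.count_cons, if_neg (by simpa using hpe)]
      push_cast
      omega

lemma pvInter_insert_of_notMem {s t : Finset Nat} {a : Nat} (h : a ∉ s) :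
    s ∩ insert a t = s ∩ t := by
  ext x
  simp only [Finset.mem_inter, Finset.mem_insert]
  constructor
  · rintro ⟨hx, rfl | hx2⟩
    · exact absurd hx h
    · exact ⟨hx, hx2⟩
  · rintro ⟨hx, hx2⟩
    exact ⟨hx, Or.inr hx2⟩

lemma pvKahnLoop_spec (parent files : List Int)
    (hpre : Pre_mostBalancedPartition parent files) :
    ∀ (F : Nat) (P : Finset Nat) (sub deg : List Int) (stack : List Nat),
      pvInv parent files sub deg stack P → parent.length + 1 ≤ F + P.card →
      (pvKahnLoop parent F sub deg stack).1.length = parent.length ∧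
      ∀ i < parent.length,
        (pvKahnLoop parent F sub deg stack).1.getD i 0 = pvS parent files (i : Int) := by 
  intro F
  induction F with
  | zero =>
    intro P sub deg stack hinv hfuel
    exfalso
    have h1 : P.card ≤ parent.length := by
      have := Finset.card_le_card hinv.2.2.1
      simpa using this
    omega
  | succ F ih =>
    intro P sub deg stack hinv hfuel
    obtain ⟨hsublen, hdeglen, hPrange, hPclosed, hnodup, hstackmem, hcomplete, hsub, hdeg⟩ := hinv
    cases stack with
    | nil =>
      have hPall : ∀ i < parent.length, i ∈ P := by
        by_contra hne
        push Not at hne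
        obtain ⟨i0, hi0L, hi0P⟩ := hne
        have hTne : ((Finset.range parent.length) \ P).Nonempty :=
          ⟨i0, by simp [Finset.mem_sdiff, Finset.mem_range, hi0L, hi0P]⟩
        obtain ⟨t, htmem, htmax⟩ := Finset.exists_max_image
          ((Finset.range parent.length) \ P)
          (fun i => pvEscAux parent (parent.length + 1) (i : Int)) hTne
        rw [Finset.mem_sdiff, Finset.mem_range] at htmem
        obtain ⟨htL, htP⟩ := htmem
        have hchild : pvChildF parent (t : Int) ⊆ P := by
          intro j hj
          rw [mem_pvChildF] at hj
          by_contra hjP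
          have hjT : j ∈ (Finset.range parent.length) \ P := by
            rw [Finset.mem_sdiff, Finset.mem_range]; exact ⟨hj.1, hjP⟩
          have h1 := htmax j hjT
          have h2 := pvEscAux_child parent files hpre j t hj.1 htL hj.2
          simp only at h1
          omega
        exact List.not_mem_nil (hcomplete t htL htP hchild)
      refine ⟨by simpa [pvKahnLoop] using hsublen, fun i hi => ?_⟩
      have hfull : pvChildF parent (i : Int) ∩ P = pvChildF parent (i : Int) := by
        rw [Finset.inter_eq_left]
        intro j hj
        rw [mem_pvChildF] at hj
        exact hPall j hj.1
      show (sub, deg).1.getD i 0 = _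
      have hrec := pvS_rec parent files hpre (i : Int) (pvValid_coe parent i hi)
      simp only [Int.toNat_natCast] at hrec
      rw [hsub i hi, hfull, ← hrec]
    | cons h t =>
      have hne : (h :: t) ≠ [] := List.cons_ne_nil h t
      have hsplit := List.dropLast_append_getLast hne
      set c := (h :: t).getLast hne with hcdef
      set rest := (h :: t).dropLast with hrdef
      have hcstack : c ∈ (h :: t) := List.getLast_mem hne
      obtain ⟨hcL, hcP, hcchild⟩ := hstackmem c hcstack
      have hnodup' : (rest ++ [c]).Nodup := by rw [hsplit]; exact hnodup
      have hcrest : c ∉ rest := by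
        rcases List.nodup_append.mp hnodup' with ⟨-, -, hdisj⟩
        intro hmem
        exact hdisj c hmem c (List.mem_singleton_self c) rfl
      have hrestnodup : rest.Nodup := (List.nodup_append.mp hnodup').1
      have hrestmem : ∀ x ∈ rest, x ∈ (h :: t) := fun x hx =>
        (List.dropLast_sublist (h :: t)).subset hx
      have hsubc : sub.getD c 0 = pvS parent files (c : Int) := by
        have hrec := pvS_rec parent files hpre (c : Int) (pvValid_coe parent c hcL)
        simp only [Int.toNat_natCast] at hrec
        rw [hsub c hcL, Finset.inter_eq_left.mpr hcchild, ← hrec]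
      rw [pvKahnLoop]
      dsimp only
      by_cases hp : 0 ≤ parent.getD c 0 ∧ parent.getD c 0 < (parent.length : Int)
      · rw [if_pos hp]
        set p := parent.getD c 0 with hpdef
        have hpn : ((p.toNat : Nat) : Int) = p := Int.toNat_of_nonneg hp.1
        have hpnL : p.toNat < parent.length := by omega
        have hcchildF : c ∈ pvChildF parent ((p.toNat : Nat) : Int) := by
          rw [mem_pvChildF]
          exact ⟨hcL, by rw [hpn, hpdef]⟩
        have hmemc : ∀ i, i < parent.length → (c ∈ pvChildF parent (i : Int) ↔ i = p.toNat) := by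
          intro i hi
          rw [mem_pvChildF]
          constructor
          · rintro ⟨-, hgi⟩; omega
          · rintro rfl; exact ⟨hcL, by rw [hpn, hpdef]⟩
        have hpnP : p.toNat ∉ P := by
          intro hmem
          exact hcP (hPclosed p.toNat hmem hcchildF)
        have hpnstack : p.toNat ∉ (h :: t) := by
          intro hmem
          exact hcP ((hstackmem p.toNat hmem).2.2 hcchildF)
        have hpnrest : p.toNat ∉ rest := fun hx => hpnstack (hrestmem _ hx)
        have hcpn : c ≠ p.toNat := fun he => hpnstack (he ▸ hcstack)
        have hcdiff : c ∈ pvChildF parent ((p.toNat : Nat) : Int) \ P := by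
          rw [Finset.mem_sdiff]; exact ⟨hcchildF, hcP⟩
        have hdegval : deg.getD p.toNat 0 - 1
            = (((pvChildF parent ((p.toNat : Nat) : Int)) \ (insert c P)).card : Int) := by
          rw [hdeg p.toNat hpnL, Finset.sdiff_insert,
            Finset.card_erase_of_mem hcdiff]
          have hpos : 1 ≤ ((pvChildF parent ((p.toNat : Nat) : Int)) \ P).card :=
            Finset.card_pos.mpr ⟨c, hcdiff⟩
          omega
        have hInv' : pvInv parent files
            (sub.set p.toNat (sub.getD p.toNat 0 + sub.getD c 0))
            (deg.set p.toNat (deg.getD p.toNat 0 - 1))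
            (if (deg.set p.toNat (deg.getD p.toNat 0 - 1)).getD p.toNat 0 == 0
              then rest ++ [p.toNat] else rest)
            (insert c P) := by
          have hdeg'pn : (deg.set p.toNat (deg.getD p.toNat 0 - 1)).getD p.toNat 0
              = deg.getD p.toNat 0 - 1 := pvGetD_set_self deg p.toNat _ (by omega)
          refine ⟨by simp [hsublen], by simp [hdeglen], ?_, ?_, ?_, ?_, ?_, ?_, ?_⟩
          · intro x hx
            rw [Finset.mem_insert] at hx
            rcases hx with rfl | hx
            · simp [hcL]
            · exact hPrange hx
          · intro i hi
            rw [Finset.mem_insert] at hi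
            rcases hi with rfl | hi
            · exact hcchild.trans (Finset.subset_insert c P)
            · exact (hPclosed i hi).trans (Finset.subset_insert c P)
          · split
            · rw [← List.concat_eq_append, List.nodup_concat]
              exact ⟨hpnrest, hrestnodup⟩
            · exact hrestnodup
          · intro x hx
            have hxcase : x ∈ rest ∨ x = p.toNat := by
              split at hx
              · rcases List.mem_append.mp hx with hx | hx
                · exact Or.inl hx
                · exact Or.inr (by simpa using hx)
              · exact Or.inl hx
            rcases hxcase with hx2 | rfl
            · obtain ⟨hxL, hxP, hxchild⟩ := hstackmem x (hrestmem x hx2)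
              refine ⟨hxL, ?_, hxchild.trans (Finset.subset_insert c P)⟩
              rw [Finset.mem_insert]
              rintro (rfl | hmem)
              · exact hcrest hx2
              · exact hxP hmem
            · refine ⟨hpnL, ?_, ?_⟩
              · rw [Finset.mem_insert]
                rintro (he | hmem)
                · exact hcpn he.symm
                · exact hpnP hmem
              · -- p.toNat is on the new stack only in the deg'=0 branch
                split at hx
                · intro j hj
                  by_contra hjP'
                  have hj2 : j ∈ pvChildF parent ((p.toNat : Nat) : Int) \ insert c P := by
                    rw [Finset.mem_sdiff]; exact ⟨hj, hjP'⟩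
                  have hcard : 1 ≤ ((pvChildF parent ((p.toNat : Nat) : Int)) \ insert c P).card :=
                    Finset.card_pos.mpr ⟨j, hj2⟩
                  rename_i hcond
                  rw [hdeg'pn] at hcond
                  simp only [beq_iff_eq] at hcond
                  omega
                · exact absurd hx hpnrest
          · intro i hiL hiP' hichild'
            have hiP : i ∉ P := fun hm => hiP' (Finset.mem_insert_of_mem hm)
            have hic : i ≠ c := fun he => hiP' (he ▸ Finset.mem_insert_self c P)
            by_cases hipn : i = p.toNat
            · have hz : ((pvChildF parent ((p.toNat : Nat) : Int)) \ insert c P).card = 0 := by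
                rw [Finset.card_eq_zero, Finset.sdiff_eq_empty_iff_subset]
                rw [hipn] at hichild'
                exact hichild'
              rw [if_pos (by rw [hdeg'pn, hdegval, hz]; simp)]
              rw [hipn]
              exact List.mem_append.mpr (Or.inr (by simp))
            · have hichild : pvChildF parent (i : Int) ⊆ P := by
                intro j hj
                have := hichild' hj
                rw [Finset.mem_insert] at this
                rcases this with rfl | hm
                · exact absurd ((hmemc i hiL).mp hj) hipn
                · exact hm
              have : i ∈ (h :: t) := hcomplete i hiL hiP hichild
              rw [← hsplit] at this
              rcases List.mem_append.mp this with hm | hm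
              · split
                · exact List.mem_append.mpr (Or.inl hm)
                · exact hm
              · exact absurd (by simpa using hm) hic
          · intro i hiL
            by_cases hipn : i = p.toNat
            · subst hipn
              rw [pvGetD_set_self sub p.toNat _ (by omega), hsub p.toNat hiL, hsubc,
                Finset.inter_insert_of_mem hcchildF,
                Finset.sum_insert (by rw [Finset.mem_inter]; rintro ⟨-, hm⟩; exact hcP hm)]
              ring
            · rw [pvGetD_set_ne sub p.toNat i _ (fun he => hipn he.symm), hsub i hiL,
                pvInter_insert_of_notMem (fun hm => hipn ((hmemc i hiL).mp hm))]
          · intro i hiL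
            by_cases hipn : i = p.toNat
            · subst hipn
              rw [pvGetD_set_self deg p.toNat _ (by omega), hdegval]
            · rw [pvGetD_set_ne deg p.toNat i _ (fun he => hipn he.symm), hdeg i hiL]
              congr 1
              rw [Finset.sdiff_insert]
              rw [Finset.erase_eq_of_notMem]
              rw [Finset.mem_sdiff]
              rintro ⟨hm, -⟩
              exact hipn ((hmemc i hiL).mp hm)
        have hcard' : parent.length + 1 ≤ F + (insert c P).card := by
          rw [Finset.card_insert_of_notMem hcP]
          omega
        exact ih (insert c P) _ _ _ hInv' hcard'
      · rw [if_neg hp]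
        have hnomemc : ∀ i, i < parent.length → c ∉ pvChildF parent (i : Int) := by
          intro i hi hmem
          rw [mem_pvChildF] at hmem
          apply hp
          rw [hmem.2]
          constructor <;> omega
        have hInv' : pvInv parent files sub deg rest (insert c P) := by
          refine ⟨hsublen, hdeglen, ?_, ?_, hrestnodup, ?_, ?_, ?_, ?_⟩
          · intro x hx
            rw [Finset.mem_insert] at hx
            rcases hx with rfl | hx
            · simp [hcL]
            · exact hPrange hx
          · intro i hi
            rw [Finset.mem_insert] at hi
            rcases hi with rfl | hi
            · exact hcchild.trans (Finset.subset_insert c P)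
            · exact (hPclosed i hi).trans (Finset.subset_insert c P)
          · intro x hx
            obtain ⟨hxL, hxP, hxchild⟩ := hstackmem x (hrestmem x hx)
            refine ⟨hxL, ?_, hxchild.trans (Finset.subset_insert c P)⟩
            rw [Finset.mem_insert]
            rintro (rfl | hmem)
            · exact hcrest hx
            · exact hxP hmem
          · intro i hiL hiP' hichild'
            have hiP : i ∉ P := fun hm => hiP' (Finset.mem_insert_of_mem hm)
            have hic : i ≠ c := fun he => hiP' (he ▸ Finset.mem_insert_self c P)
            have hichild : pvChildF parent (i : Int) ⊆ P := by
              intro j hj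
              have := hichild' hj
              rw [Finset.mem_insert] at this
              rcases this with rfl | hm
              · exact absurd hj (hnomemc i hiL)
              · exact hm
            have : i ∈ (h :: t) := hcomplete i hiL hiP hichild
            rw [← hsplit] at this
            rcases List.mem_append.mp this with hm | hm
            · exact hm
            · exact absurd (by simpa using hm) hic
          · intro i hiL
            rw [hsub i hiL, pvInter_insert_of_notMem (hnomemc i hiL)]
          · intro i hiL
            rw [hdeg i hiL]
            congr 1
            rw [Finset.sdiff_insert, Finset.erase_eq_of_notMem]
            rw [Finset.mem_sdiff]
            rintro ⟨hm, -⟩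
            exact hnomemc i hiL hm
        have hcard' : parent.length + 1 ≤ F + (insert c P).card := by
          rw [Finset.card_insert_of_notMem hcP]
          omega
        exact ih (insert c P) _ _ _ hInv' hcard' 

lemma pvDeg0_spec (parent : List Int) (i : Nat) (hi : i < parent.length) :
    (parent.foldl
      (fun deg p => if 0 ≤ p ∧ p < (parent.length : Int)
        then deg.set p.toNat (deg.getD p.toNat 0 + 1) else deg)
      (List.replicate parent.length (0 : Int))).getD i 0
      = ((pvChildF parent (i : Int)).card : Int) := by 
  obtain ⟨-, hih⟩ := pvDeg0_fold parent parent (List.replicate parent.length (0 : Int))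
    (by simp)
  rw [hih i hi, List.getD_replicate _ hi, pvCount_eq_childF_card]
  simp

lemma pvDeg0_length (parent : List Int) :
    (parent.foldl
      (fun deg p => if 0 ≤ p ∧ p < (parent.length : Int)
        then deg.set p.toNat (deg.getD p.toNat 0 + 1) else deg)
      (List.replicate parent.length (0 : Int))).length = parent.length := by 
  exact (pvDeg0_fold parent parent (List.replicate parent.length (0 : Int)) (by simp)).1

lemma pvB_eq (parent files : List Int) (hpre : Pre_mostBalancedPartition parent files) :
    mostBalancedPartition_alt parent files =
      (List.range parent.length).foldl
        (fun (m : Int) (j : Nat) => min m |files.sum - pvS parent files (j : Int) * 2|) files.sum := by 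
  have hL : parent.length ≤ files.length := hpre.1
  have hdeg0len := pvDeg0_length parent
  have hdeg0 := pvDeg0_spec parent
  have hinv : pvInv parent files (files.take parent.length)
      (parent.foldl
        (fun deg p => if 0 ≤ p ∧ p < (parent.length : Int)
          then deg.set p.toNat (deg.getD p.toNat 0 + 1) else deg)
        (List.replicate parent.length (0 : Int)))
      ((List.range parent.length).filter
        (fun i => (parent.foldl
          (fun deg p => if 0 ≤ p ∧ p < (parent.length : Int)
            then deg.set p.toNat (deg.getD p.toNat 0 + 1) else deg)
          (List.replicate parent.length (0 : Int))).getD i 0 == 0))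
      ∅ := by
    refine ⟨by simp [List.length_take]; omega, hdeg0len, Finset.empty_subset _, ?_, ?_, ?_, ?_, ?_, ?_⟩
    · intro i hi; exact absurd hi (Finset.notMem_empty i)
    · exact List.Nodup.filter _ (List.nodup_range)
    · intro c hc
      rw [List.mem_filter, List.mem_range] at hc
      obtain ⟨hcL, hcz⟩ := hc
      rw [hdeg0 c hcL] at hcz
      refine ⟨hcL, Finset.notMem_empty c, ?_⟩
      have : (pvChildF parent (c : Int)).card = 0 := by
        simpa using hcz
      rw [Finset.card_eq_zero] at this
      rw [this]
    · intro i hiL hiP hichild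
      rw [List.mem_filter, List.mem_range]
      refine ⟨hiL, ?_⟩
      rw [hdeg0 i hiL]
      have : pvChildF parent (i : Int) = ∅ := Finset.subset_empty.mp hichild
      rw [this]
      simp
    · intro i hiL
      have hif : i < files.length := by omega
      rw [Finset.inter_empty, Finset.sum_empty, add_zero,
        pvGetD_eq_getElem _ _ (by rw [List.length_take]; omega),
        List.getElem_take, pvGetD_eq_getElem files i hif]
    · intro i hiL
      rw [hdeg0 i hiL, Finset.sdiff_empty]
  obtain ⟨hlen, hval⟩ := pvKahnLoop_spec parent files hpre (parent.length + 1) ∅ _ _ _ hinv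
    (by simp)
  have hlist : (pvKahnLoop parent (parent.length + 1) (files.take parent.length)
      (parent.foldl
        (fun deg p => if 0 ≤ p ∧ p < (parent.length : Int)
          then deg.set p.toNat (deg.getD p.toNat 0 + 1) else deg)
        (List.replicate parent.length (0 : Int)))
      ((List.range parent.length).filter
        (fun i => (parent.foldl
          (fun deg p => if 0 ≤ p ∧ p < (parent.length : Int)
            then deg.set p.toNat (deg.getD p.toNat 0 + 1) else deg)
          (List.replicate parent.length (0 : Int))).getD i 0 == 0))).1
      = List.map (fun j : Nat => pvS parent files (j : Int)) (List.range parent.length) := by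
    apply List.ext_getElem
    · rw [hlen, List.length_map, List.length_range]
    · intro i h1 h2
      rw [List.length_map, List.length_range] at h2
      rw [← pvGetD_eq_getElem _ _ h1, hval i h2]
      simp
  show (pvKahnLoop parent (parent.length + 1) _ _ _).1.foldl _ files.sum = _
  rw [hlist, List.foldl_map]
  congr 1
  funext b j
  show (if |files.sum - 2 * pvS parent files (j : Int)| < b
        then |files.sum - 2 * pvS parent files (j : Int)| else b)
      = min b |files.sum - pvS parent files (j : Int) * 2|
  rw [mul_comm]
  rcases le_or_gt b |files.sum - pvS parent files (j : Int) * 2| with hle | hlt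
  · rw [if_neg (by omega), min_eq_left hle]
  · rw [if_pos hlt, min_eq_right (by omega)]

-- ===== VERDICT (by name: the statement is the Claim_ definition above) =====
theorem mostBalancedPartition_spec : Claim_equal_mostBalancedPartition := by
  intro parent files _ hpre
  unfold Spec_mostBalancedPartition
  rw [pvA_eq parent files hpre, pvB_eq parent files hpre]
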